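-- pv_equiv track=rewrite | github.com/victor647/PokerAnalyzer | MatchFinder.py | is_pair_possible
-- ===== SOURCE A (Python) =====
-- from collections import Counter
--
-- def is_pair_possible(pair_count: int, visible_cards: list):
--     possible_numbers = []
--     card_numbers = [card[1] for card in visible_cards]
--     pair_datas = Counter(card_numbers).most_common()
--     for data in pair_datas:
--         if data[1] >= pair_count - 1:
--             possible_numbers.append(data[0])
--     return possible_numbers
-- ===== SOURCE B (Python) =====
-- def is_pair_possible(pair_count: int, visible_cards: list):
--     counts = {}
--     for card in visible_cards:
--         num = card[1]
--         counts[num] = counts.get(num, 0) + 1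
--     max_count = 0
--     for c in counts.values():
--         max_count = max(max_count, c)
--     threshold = pair_count - 1
--     result = []
--     for c in range(max_count, max(threshold - 1, 0), -1):
--         for num, cnt in counts.items():
--             if cnt == c:
--                 result.append(num)
--     return result
-- ===== Notes on version B (the rewrite author's own statement) =====
-- stated objective: alternative
-- what changed: Replaces Counter.most_common()'s comparison sort by building the counts dict by hand, taking the running maximum count, and scanning frequencies from max_count downward, emitting each frequency's numbers in first-appearance order (stopping before the threshold).
import Mathlib
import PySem

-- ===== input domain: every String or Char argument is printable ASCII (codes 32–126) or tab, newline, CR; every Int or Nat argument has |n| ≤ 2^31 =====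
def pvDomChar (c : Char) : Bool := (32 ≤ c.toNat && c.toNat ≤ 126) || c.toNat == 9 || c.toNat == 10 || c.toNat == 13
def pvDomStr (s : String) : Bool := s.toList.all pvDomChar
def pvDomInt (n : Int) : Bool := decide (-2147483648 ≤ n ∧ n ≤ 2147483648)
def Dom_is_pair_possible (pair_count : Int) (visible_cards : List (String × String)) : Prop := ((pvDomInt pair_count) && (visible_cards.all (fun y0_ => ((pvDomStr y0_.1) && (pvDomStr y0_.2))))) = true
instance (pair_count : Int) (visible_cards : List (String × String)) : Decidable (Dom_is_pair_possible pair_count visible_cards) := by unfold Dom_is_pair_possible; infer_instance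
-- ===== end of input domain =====

-- B replaces Counter.most_common()'s comparison sort by counting into a dict and scanning the
-- frequencies from the maximum count downward (objective: alternative algorithm, same value).

-- ===== PORT A =====
-- A: count card numbers, take most_common() (= stable sort of the counter's items by count,
-- descending), append each number whose count ≥ pair_count - 1.
def is_pair_possible (pair_count : Int) (visible_cards : List (String × String)) : List String :=
  let card_numbers := visible_cards.map (fun card => card.2)
  let pair_datas := PySem.List.sorted (PySem.Dict.counter card_numbers).items (fun d => d.2) true
  pair_datas.foldl (fun acc data => if data.2 ≥ pair_count - 1 then acc ++ [data.1] else acc) []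

-- ===== PORT B =====
-- B: build the counts dict by hand, take the running max of the counts, then walk the
-- frequencies from max_count down to max(threshold - 1, 0) exclusive, emitting the numbers
-- of each frequency in dict (first-appearance) order.
def is_pair_possible_alt (pair_count : Int) (visible_cards : List (String × String)) : List String :=
  let counts := visible_cards.foldl (fun d card => d.insert card.2 (d.getD card.2 0 + 1))
    (PySem.Dict.empty : PySem.Dict String Int)
  let max_count := counts.values.foldl (fun m c => max m c) 0
  let threshold := pair_count - 1
  (PySem.List.pyRange max_count (max (threshold - 1) 0) (-1)).foldl
    (fun result c =>
      counts.items.foldl (fun result p => if p.2 == c then result ++ [p.1] else result) result)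
    []

-- ===== PRECONDITION & SPEC =====
def Spec_is_pair_possible (pair_count : Int) (visible_cards : List (String × String)) (out : List String) : Prop := out = is_pair_possible_alt pair_count visible_cards
instance (pair_count : Int) (visible_cards : List (String × String)) (out : List String) : Decidable (Spec_is_pair_possible pair_count visible_cards out) := by unfold Spec_is_pair_possible; infer_instance

-- ===== CLAIM (what is proved, stated in full; the proofs are below) =====
def Claim_equal_is_pair_possible : Prop := ∀ (pair_count : Int) (visible_cards : List (String × String)), Dom_is_pair_possible pair_count visible_cards → Spec_is_pair_possible pair_count visible_cards (is_pair_possible pair_count visible_cards)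

-- ===== LEMMAS AND PROOFS =====

-- pyRange with step -1, written as an explicit descending map of List.range
theorem pyRange_neg_one (a b : Int) :
    PySem.List.pyRange a b (-1) = (List.range (a - b).toNat).map (fun k : Nat => a - (k : Int)) := by
  simp only [PySem.List.pyRange]
  split_ifs <;> try omega
  · exact (‹False›).elim
  · have e1 : ((a - b + - -1 - 1) / - -1).toNat = (a - b).toNat := by norm_num
    rw [e1]
    exact List.map_congr_left (fun k _ => by ring)
  · have e0 : (a - b).toNat = 0 := by omega
    simp [e0]

theorem mem_pyRange_neg_one {a b c : Int} :
    c ∈ PySem.List.pyRange a b (-1) ↔ b < c ∧ c ≤ a := by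
  rw [pyRange_neg_one]
  constructor
  · intro h
    obtain ⟨k, hk, rfl⟩ := List.mem_map.mp h
    rw [List.mem_range] at hk
    omega
  · rintro ⟨h1, h2⟩
    exact List.mem_map.mpr ⟨(a - c).toNat, List.mem_range.mpr (by omega), by omega⟩

theorem pairwise_gt_pyRange_neg_one (a b : Int) :
    (PySem.List.pyRange a b (-1)).Pairwise (· > ·) := by
  rw [pyRange_neg_one, List.pairwise_map]
  exact List.pairwise_lt_range.imp (fun {x y} h => by simp only [gt_iff_lt]; omega)

-- insertBy passes over a block of elements it does not go before
theorem insertBy_append_left {α : Type} (before : α → α → Bool) (x : α) (l₁ l₂ : List α)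
    (h : ∀ a ∈ l₁, before x a = false) :
    PySem.List.insertBy before x (l₁ ++ l₂) = l₁ ++ PySem.List.insertBy before x l₂ := by
  induction l₁ with
  | nil => rfl
  | cons a t ih =>
    simp only [List.cons_append, PySem.List.insertBy, h a (by simp), Bool.false_eq_true,
      if_false, List.cons.injEq, true_and]
    exact ih (fun a ha => h a (by simp [ha]))

theorem insertBy_cons_of_before {α : Type} (before : α → α → Bool) (x a : α) (t : List α)
    (h : before x a = true) :
    PySem.List.insertBy before x (a :: t) = x :: a :: t := by
  simp [PySem.List.insertBy, h]

-- STABILITY step: inserting x into a list grouped by strictly decreasing key values puts x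
-- at the end of its own key's group.
theorem insertBy_flatMap_filter {α : Type} (key : α → Int) (x : α) (xs : List α) :
    ∀ (cs : List Int), cs.Pairwise (· > ·) → key x ∈ cs →
    PySem.List.insertBy (fun a b => decide (key b < key a)) x
        (cs.flatMap (fun c => xs.filter (fun y => key y == c)))
      = cs.flatMap (fun c => (xs ++ [x]).filter (fun y => key y == c)) := by
  intro cs
  induction cs with
  | nil => simp
  | cons c cs' ih =>
    intro hpw hmem
    have hpw' := (List.pairwise_cons.mp hpw).2
    have hlt : ∀ c' ∈ cs', c' < c := (List.pairwise_cons.mp hpw).1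
    simp only [List.flatMap_cons]
    by_cases hx : key x = c
    · -- x joins the head group; later groups are unchanged
      rw [insertBy_append_left _ _ _ _ (by
        intro a ha
        have h2 := (List.mem_filter.mp ha).2
        simp only [beq_iff_eq] at h2
        simp [h2, hx])]
      have hhead : (xs ++ [x]).filter (fun y => key y == c) =
          xs.filter (fun y => key y == c) ++ [x] := by
        rw [List.filter_append]
        simp [hx]
      have htail : cs'.flatMap (fun c' => (xs ++ [x]).filter (fun y => key y == c')) =
          cs'.flatMap (fun c' => xs.filter (fun y => key y == c')) := by
        apply List.flatMap_congr
        intro c' hc'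
        rw [List.filter_append]
        have hne : ¬ (key x = c') := by have := hlt c' hc'; omega
        simp [hne]
      rw [hhead, htail]
      have hins : PySem.List.insertBy (fun a b => decide (key b < key a)) x
          (cs'.flatMap (fun c' => xs.filter (fun y => key y == c'))) =
          x :: cs'.flatMap (fun c' => xs.filter (fun y => key y == c')) := by
        cases hrest : cs'.flatMap (fun c' => xs.filter (fun y => key y == c')) with
        | nil => rfl
        | cons a t =>
          apply insertBy_cons_of_before
          have ha : a ∈ cs'.flatMap (fun c' => xs.filter (fun y => key y == c')) := by
            rw [hrest]; simp
          obtain ⟨c', hc', haf⟩ := List.mem_flatMap.mp ha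
          have h2 := (List.mem_filter.mp haf).2
          simp only [beq_iff_eq] at h2
          have := hlt c' hc'
          simp only [decide_eq_true_eq]
          omega
      rw [hins]
      simp
    · -- x belongs to a later group
      have hmem' : key x ∈ cs' := by
        rcases List.mem_cons.mp hmem with h | h
        · exact absurd h hx
        · exact h
      have hxlt : key x < c := hlt _ hmem'
      rw [insertBy_append_left _ _ _ _ (by
        intro a ha
        have h2 := (List.mem_filter.mp ha).2
        simp only [beq_iff_eq] at h2
        simp only [decide_eq_false_iff_not]
        omega)]
      have hhead : (xs ++ [x]).filter (fun y => key y == c) =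
          xs.filter (fun y => key y == c) := by
        rw [List.filter_append]
        simp [hx]
      rw [hhead, ih hpw' hmem']

-- GROUPING: a stable descending sort is the concatenation, over any strictly decreasing list
-- of key values covering the list, of the equal-key groups in original order.
theorem sorted_rev_eq_flatMap {α : Type} (key : α → Int) (xs : List α) (cs : List Int)
    (hpw : cs.Pairwise (· > ·)) (hcov : ∀ x ∈ xs, key x ∈ cs) :
    PySem.List.sorted xs key true = cs.flatMap (fun c => xs.filter (fun y => key y == c)) := by
  induction xs using List.reverseRecOn with
  | nil =>
    rw [PySem.List.sorted_rev_eq_foldl_insertBy]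
    simp
  | append_singleton xs x ih =>
    rw [PySem.List.sorted_rev_eq_foldl_insertBy, List.foldl_append]
    simp only [List.foldl_cons, List.foldl_nil]
    rw [← PySem.List.sorted_rev_eq_foldl_insertBy,
      ih (fun y hy => hcov y (by simp [hy]))]
    exact insertBy_flatMap_filter key x xs cs hpw (hcov x (by simp))

theorem filter_range_lt (N n : Nat) (h : N ≤ n) :
    (List.range n).filter (fun k => decide (k < N)) = List.range N := by
  induction n, h using Nat.le_induction with
  | base =>
    apply List.filter_eq_self.mpr
    intro a ha
    simp_all [List.mem_range]
  | succ n hn ih =>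
    rw [List.range_succ, List.filter_append, ih]
    simp [Nat.not_lt.mpr hn]

theorem filter_pyRange_ge (thr M : Int) (hM : 0 ≤ M) :
    (PySem.List.pyRange M 0 (-1)).filter (fun c => decide (thr ≤ c)) =
      PySem.List.pyRange M (max (thr - 1) 0) (-1) := by
  rw [pyRange_neg_one, pyRange_neg_one, List.filter_map]
  have hle : (M - max (thr - 1) 0).toNat ≤ (M - 0).toNat := by omega
  rw [List.filter_congr (q := fun k : Nat => decide (k < (M - max (thr - 1) 0).toNat))
      (by intro k hk
          rw [List.mem_range] at hk
          simp only [Function.comp_apply, decide_eq_decide]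
          omega),
    filter_range_lt _ _ hle]

theorem flatMap_ite_nil {β : Type} (p : Int → Prop) [DecidablePred p] (l : List Int)
    (f : Int → List β) :
    l.flatMap (fun c => if p c then f c else []) = (l.filter (fun c => decide (p c))).flatMap f := by
  induction l with
  | nil => rfl
  | cons c t ih =>
    by_cases h : p c <;> simp [h, ih]

-- the heart of the equivalence, stated on an arbitrary list with bounded positive keys
theorem sorted_rev_filter_ge {α : Type} (key : α → Int) (xs : List α) (M thr : Int)
    (hM0 : 0 ≤ M) (hbd : ∀ x ∈ xs, 1 ≤ key x ∧ key x ≤ M) :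
    (PySem.List.sorted xs key true).filter (fun x => decide (thr ≤ key x)) =
      (PySem.List.pyRange M (max (thr - 1) 0) (-1)).flatMap
        (fun c => xs.filter (fun y => key y == c)) := by
  rw [sorted_rev_eq_flatMap key xs (PySem.List.pyRange M 0 (-1))
      (pairwise_gt_pyRange_neg_one M 0)
      (by intro x hx
          rw [mem_pyRange_neg_one]
          have := hbd x hx
          omega),
    List.filter_flatMap]
  have hcollapse : ∀ c ∈ PySem.List.pyRange M 0 (-1),
      (xs.filter (fun y => key y == c)).filter (fun x => decide (thr ≤ key x)) =
      if thr ≤ c then xs.filter (fun y => key y == c) else [] := by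
    intro c _
    by_cases h : thr ≤ c
    · rw [if_pos h]
      apply List.filter_eq_self.mpr
      intro a ha
      have h2 := (List.mem_filter.mp ha).2
      simp only [beq_iff_eq] at h2
      simp [h2, h]
    · rw [if_neg h]
      apply List.filter_eq_nil_iff.mpr
      intro a ha
      have h2 := (List.mem_filter.mp ha).2
      simp only [beq_iff_eq] at h2
      simp only [decide_eq_true_eq]
      omega
  rw [List.flatMap_congr hcollapse, flatMap_ite_nil (fun c => thr ≤ c),
    filter_pyRange_ge thr M hM0]

-- ===== VERDICT (by name: the statement is the Claim_ definition above) =====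
theorem is_pair_possible_spec : Claim_equal_is_pair_possible := by
  intro pair_count visible_cards _dom
  unfold Spec_is_pair_possible is_pair_possible is_pair_possible_alt
  have hcnt : visible_cards.foldl (fun d card => d.insert card.2 (d.getD card.2 0 + 1))
      (PySem.Dict.empty : PySem.Dict String Int)
      = PySem.Dict.counter (visible_cards.map (fun card => card.2)) := by
    rw [← PySem.Dict.foldl_insert_getD_add_one_eq_counter, List.foldl_map]
  rw [hcnt]
  set nums := visible_cards.map (fun card => card.2) with hnums
  set items := (PySem.Dict.counter nums).items with hitems
  set M := (PySem.Dict.counter nums).values.foldl (fun m c => max m c) 0 with hM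
  -- A's loop: filter-and-project the sorted items
  rw [PySem.List.foldl_append_ite (fun d : String × Int => d.2 ≥ pair_count - 1) (fun d => d.1)]
  -- B's loops: flatMap of per-count filters
  simp only [PySem.List.foldl_append_if]
  rw [PySem.List.foldl_append_eq_flatMap]
  simp only [List.nil_append]
  rw [← List.map_flatMap]
  have hvals : (PySem.Dict.counter nums).values = items.map (fun p => p.2) := rfl
  have hM0 : 0 ≤ M := by
    rw [hM, hvals]
    exact (PySem.List.le_foldl_max_int (items.map (fun p => p.2)) (fun y => y) 0).1
  have hbd : ∀ p ∈ items, 1 ≤ p.2 ∧ p.2 ≤ M := by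
    intro p hp
    constructor
    · rw [hitems, PySem.Dict.items_counter] at hp
      obtain ⟨k, hk, rfl⟩ := List.mem_map.mp hp
      have hc : 0 < nums.count k := List.count_pos_iff.mpr ((PySem.Set.mem_ofList _ _).mp hk)
      simp only []
      omega
    · rw [hM, hvals]
      exact (PySem.List.le_foldl_max_int (items.map (fun p => p.2)) (fun y => y) 0).2
        p.2 (List.mem_map_of_mem hp)
  have hmain := sorted_rev_filter_ge (fun p : String × Int => p.2) items M
    (pair_count - 1) hM0 hbd
  simp only [ge_iff_le]
  rw [hmain]
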